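-- pv_equiv track=rewrite | github.com/MMI-research-team/mmi | T2PT/script.py | convertAsciiToPNGFormat
-- ===== SOURCE A (Python) =====
-- def convertAsciiToPNGFormat(textContent):
--     firsts = textContent[::3]
--     seconds = textContent[1::3]
--     thirds = textContent[2::3]
--     pngPixels = []
--     for i, j, k in zip(firsts, seconds, thirds):
--         pngPixels.append([ord(i), ord(j), ord(k)])
--     return pngPixels
-- ===== SOURCE B (Python) =====
-- def convertAsciiToPNGFormat(textContent):
--     return [[ord(textContent[i]), ord(textContent[i + 1]), ord(textContent[i + 2])]
--             for i in range(0, len(textContent) - 2, 3)]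
-- ===== Notes on version B (the rewrite author's own statement) =====
-- stated objective: simpler
-- what changed: B replaces the three strided slices plus zip-and-append loop by a single index comprehension stepping through the string three characters at a time.
import Mathlib
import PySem

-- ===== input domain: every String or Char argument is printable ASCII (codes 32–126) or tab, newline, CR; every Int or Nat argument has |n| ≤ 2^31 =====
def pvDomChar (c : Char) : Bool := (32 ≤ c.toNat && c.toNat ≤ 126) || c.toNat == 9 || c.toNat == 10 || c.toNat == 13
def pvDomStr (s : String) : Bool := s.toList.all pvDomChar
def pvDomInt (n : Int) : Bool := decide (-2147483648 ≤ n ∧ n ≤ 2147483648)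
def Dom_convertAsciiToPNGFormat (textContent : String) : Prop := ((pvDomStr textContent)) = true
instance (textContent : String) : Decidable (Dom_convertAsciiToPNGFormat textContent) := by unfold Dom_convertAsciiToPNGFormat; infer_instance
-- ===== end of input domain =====

-- B replaces the three strided slices plus zip-and-append loop by a single index
-- comprehension stepping through the string three characters at a time (objective: simpler).


-- ===== PORT A =====
-- textContent[::3], textContent[1::3], textContent[2::3] (a step-3 slice never raises,
-- so the .getD [] default is never used), then the zip-and-append loop as a foldl.
def convertAsciiToPNGFormat (textContent : String) : List (List Int) :=
  let cs := textContent.toList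
  let firsts := (PySem.List.slice? cs none none 3).getD []
  let seconds := (PySem.List.slice? cs (some 1) none 3).getD []
  let thirds := (PySem.List.slice? cs (some 2) none 3).getD []
  (firsts.zip (seconds.zip thirds)).foldl
    (fun pngPixels t =>
      pngPixels ++ [[(t.1.toNat : Int), (t.2.1.toNat : Int), (t.2.2.toNat : Int)]]) []

-- ===== PORT B =====
-- [[ord(t[i]), ord(t[i+1]), ord(t[i+2])] for i in range(0, len(t)-2, 3)];
-- every index the range produces is in bounds, so the .getD ' ' default is never used.
def convertAsciiToPNGFormat_alt (textContent : String) : List (List Int) :=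
  let cs := textContent.toList
  (PySem.List.pyRange 0 ((cs.length : Int) - 2) 3).map
    (fun i => [(((PySem.List.pyGet? cs i).getD ' ').toNat : Int),
               (((PySem.List.pyGet? cs (i + 1)).getD ' ').toNat : Int),
               (((PySem.List.pyGet? cs (i + 2)).getD ' ').toNat : Int)])

-- ===== PRECONDITION & SPEC =====
def Spec_convertAsciiToPNGFormat (textContent : String) (out : List (List Int)) : Prop := out = convertAsciiToPNGFormat_alt textContent
instance (textContent : String) (out : List (List Int)) : Decidable (Spec_convertAsciiToPNGFormat textContent out) := by unfold Spec_convertAsciiToPNGFormat; infer_instance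

-- ===== CLAIM (what is proved, stated in full; the proofs are below) =====
def Claim_equal_convertAsciiToPNGFormat : Prop := ∀ (textContent : String), Dom_convertAsciiToPNGFormat textContent → Spec_convertAsciiToPNGFormat textContent (convertAsciiToPNGFormat textContent)

-- ===== LEMMAS AND PROOFS =====

-- the chunk-recursion shape both ports are reduced to
def pvChunks : List Char → List (List Int)
  | a :: b :: c :: r =>
      [(a.toNat : Int), (b.toNat : Int), (c.toNat : Int)] :: pvChunks r
  | _ => []

lemma pv_firsts_cons (r : List Char) (a b c : Char) :
    (PySem.List.slice? (a :: b :: c :: r) none none 3).getD [] =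
      a :: (PySem.List.slice? r none none 3).getD [] := by
  simp only [PySem.List.slice?, PySem.List.sliceIndices]
  norm_num
  have hn : (if 0 ≤ (r.length:Int) + 1 + 1 then (((r.length:Int) + 1 + 1 + 1 + 3 - 1) / 3).toNat else 0)
      = (if 0 < r.length then (((r.length:Int) + 3 - 1) / 3).toNat else 0) + 1 := by
    split_ifs <;> omega
  rw [hn, List.range_succ_eq_map, List.filterMap_cons, List.filterMap_map]
  norm_num
  apply List.filterMap_congr
  intro x _
  have h3 : (3 * ((x:Int) + 1)).toNat = 3 * x + 3 := by omega
  have h4 : (3 * (x:Int)).toNat = 3 * x := by omega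
  simp [h3, h4]

lemma pv_seconds_cons (r : List Char) (a b c : Char) :
    (PySem.List.slice? (a :: b :: c :: r) (some 1) none 3).getD [] =
      b :: (PySem.List.slice? r (some 1) none 3).getD [] := by
  rcases r with _ | ⟨d, r⟩
  · simp [PySem.List.slice?, PySem.List.sliceIndices]
  · simp only [PySem.List.slice?, PySem.List.sliceIndices]
    norm_num
    simp only [show min (1:Int) (↑r.length + 1 + 1 + 1 + 1) = 1 from by omega]
    have hn : (if 0 ≤ (r.length:Int) + 1 + 1 then (((r.length:Int) + 1 + 1 + 1 + 1 - 1 + 3 - 1) / 3).toNat else 0)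
        = (if 0 < r.length then (((r.length:Int) + 3 - 1) / 3).toNat else 0) + 1 := by
      split_ifs <;> omega
    rw [hn, List.range_succ_eq_map, List.filterMap_cons, List.filterMap_map]
    norm_num
    apply List.filterMap_congr
    intro x _
    have h3 : ((1:Int) + 3 * ((x:Int) + 1)).toNat = 3 * x + 4 := by omega
    have h4 : ((1:Int) + 3 * (x:Int)).toNat = 3 * x + 1 := by omega
    simp [h3, h4]

lemma pv_thirds_cons (r : List Char) (a b c : Char) :
    (PySem.List.slice? (a :: b :: c :: r) (some 2) none 3).getD [] =
      c :: (PySem.List.slice? r (some 2) none 3).getD [] := by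
  rcases r with _ | ⟨d, _ | ⟨e, r⟩⟩
  · simp [PySem.List.slice?, PySem.List.sliceIndices]
  · simp [PySem.List.slice?, PySem.List.sliceIndices]
  · simp only [PySem.List.slice?, PySem.List.sliceIndices]
    norm_num
    simp only [show min (2:Int) (↑r.length + 1 + 1 + 1 + 1 + 1) = 2 from by omega,
               show min (2:Int) (↑r.length + 1 + 1) = 2 from by omega]
    have hn : (if 2 ≤ (r.length:Int) + 1 + 1 + 1 + 1 then (((r.length:Int) + 1 + 1 + 1 + 1 + 1 - 2 + 3 - 1) / 3).toNat else 0)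
        = (if 2 ≤ (r.length:Int) + 1 then (((r.length:Int) + 1 + 1 - 2 + 3 - 1) / 3).toNat else 0) + 1 := by
      split_ifs <;> omega
    rw [hn, List.range_succ_eq_map, List.filterMap_cons, List.filterMap_map]
    norm_num
    simp only [show ((2:Int).toNat) = 2 from rfl, List.getElem?_cons_succ, List.getElem?_cons_zero]
    norm_num
    apply List.filterMap_congr
    intro x _
    have h3 : ((2:Int) + 3 * ((x:Int) + 1)).toNat = 3 * x + 5 := by omega
    have h4 : ((2:Int) + 3 * (x:Int)).toNat = 3 * x + 2 := by omega
    simp [h3, h4]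

lemma pv_thirds_short (cs : List Char) (h : cs.length ≤ 2) :
    (PySem.List.slice? cs (some 2) none 3).getD [] = [] := by
  rcases cs with _ | ⟨a, _ | ⟨b, _ | ⟨c, cs⟩⟩⟩
  · simp [PySem.List.slice?, PySem.List.sliceIndices]
  · simp [PySem.List.slice?, PySem.List.sliceIndices]
  · simp [PySem.List.slice?, PySem.List.sliceIndices]
  · simp at h

lemma pvA_eq_chunks (cs : List Char) :
    ((((PySem.List.slice? cs none none 3).getD []).zip
      (((PySem.List.slice? cs (some 1) none 3).getD []).zip
       ((PySem.List.slice? cs (some 2) none 3).getD []))).foldl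
      (fun pngPixels t =>
        pngPixels ++ [[(t.1.toNat : Int), (t.2.1.toNat : Int), (t.2.2.toNat : Int)]]) [])
      = pvChunks cs := by
  rw [PySem.List.foldl_append_singleton_eq_map
    (f := fun t : Char × Char × Char => [(t.1.toNat : Int), (t.2.1.toNat : Int), (t.2.2.toNat : Int)])]
  induction cs using pvChunks.induct with
  | case1 a b c r ih =>
      rw [pv_firsts_cons, pv_seconds_cons, pv_thirds_cons]
      simpa [pvChunks] using ih
  | case2 cs h =>
      have hlen : cs.length ≤ 2 := by
        rcases cs with _ | ⟨a, _ | ⟨b, _ | ⟨c, r⟩⟩⟩ <;> first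
          | exact (h _ _ _ _ rfl).elim
          | simp
      rw [pv_thirds_short cs hlen]
      have h2 : pvChunks cs = [] := by
        rcases cs with _ | ⟨a, _ | ⟨b, _ | ⟨c, r⟩⟩⟩ <;> simp_all [pvChunks]
      simp [h2]

lemma pv_shift3 (a b c : Char) (xs : List Char) (i : Int) (h : 0 ≤ i) :
    PySem.List.pyGet? (a :: b :: c :: xs) (i + 3) = PySem.List.pyGet? xs i := by
  simp only [PySem.List.pyGet?, PySem.List.pyIdx?, List.length_cons]
  by_cases hlt : i < (xs.length : Int)
  · have h0 : (0:Int) ≤ i + 3 := by omega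
    have h1 : i + 3 < ((xs.length : Int) + 1 + 1 + 1) := by omega
    have h2 : (i + 3).toNat = i.toNat + 3 := by omega
    simp [h0, h, hlt, h1, h2]
  · have h0 : (0:Int) ≤ i + 3 := by omega
    have h1 : ¬ (i + 3 < ((xs.length : Int) + 1 + 1 + 1)) := by omega
    simp [h0, h, hlt, h1]

lemma pvB_cons (r : List Char) (a b c : Char) :
    (PySem.List.pyRange 0 (((a :: b :: c :: r).length : Int) - 2) 3).map
      (fun i => [(((PySem.List.pyGet? (a :: b :: c :: r) i).getD ' ').toNat : Int),
                 (((PySem.List.pyGet? (a :: b :: c :: r) (i + 1)).getD ' ').toNat : Int),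
                 (((PySem.List.pyGet? (a :: b :: c :: r) (i + 2)).getD ' ').toNat : Int)])
    = [(a.toNat : Int), (b.toNat : Int), (c.toNat : Int)] ::
      (PySem.List.pyRange 0 ((r.length : Int) - 2) 3).map
      (fun i => [(((PySem.List.pyGet? r i).getD ' ').toNat : Int),
                 (((PySem.List.pyGet? r (i + 1)).getD ' ').toNat : Int),
                 (((PySem.List.pyGet? r (i + 2)).getD ' ').toNat : Int)]) := by
  rw [PySem.List.pyRange_of_pos _ _ (by norm_num), PySem.List.pyRange_of_pos _ _ (by norm_num)]
  simp only [List.length_cons, List.map_map]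
  norm_num
  have hn : (if 2 ≤ (r.length:Int) + 1 + 1 then (((r.length:Int) + 1 + 1 + 1 - 2 + 3 - 1) / 3).toNat else 0)
      = (if 2 < r.length then (((r.length:Int) - 2 + 3 - 1) / 3).toNat else 0) + 1 := by
    split_ifs <;> omega
  rw [hn, List.range_succ_eq_map, List.map_cons, List.map_map]
  congr 1
  · have h01 : (0:Int) ≤ ↑r.length + 1 + 1 := by positivity
    have h02 : (0:Int) ≤ ↑r.length + 1 := by positivity
    have h03 : (2:Int) ≤ ↑r.length + 1 + 1 := by omega
    norm_num [PySem.List.pyGet?, PySem.List.pyIdx?, h01, h02, h03]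
    rfl
  apply List.map_congr_left
  intro k _
  simp only [Function.comp_apply, Nat.succ_eq_add_one, Nat.cast_add, Nat.cast_one]
  have e1 : (3:Int) * ((k:Int) + 1) + 1 = (3 * (k:Int) + 1) + 3 := by ring
  have e2 : (3:Int) * ((k:Int) + 1) + 2 = (3 * (k:Int) + 2) + 3 := by ring
  have e0 : (3:Int) * ((k:Int) + 1) = (3 * (k:Int)) + 3 := by ring
  rw [e1, e2, e0, pv_shift3 _ _ _ _ _ (by positivity), pv_shift3 _ _ _ _ _ (by positivity),
      pv_shift3 _ _ _ _ _ (by positivity)]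

lemma pvB_eq_chunks (cs : List Char) :
    (PySem.List.pyRange 0 ((cs.length : Int) - 2) 3).map
      (fun i => [(((PySem.List.pyGet? cs i).getD ' ').toNat : Int),
                 (((PySem.List.pyGet? cs (i + 1)).getD ' ').toNat : Int),
                 (((PySem.List.pyGet? cs (i + 2)).getD ' ').toNat : Int)])
      = pvChunks cs := by
  induction cs using pvChunks.induct with
  | case1 a b c r ih => rw [pvB_cons, ih]; rfl
  | case2 cs h =>
      have hlen : cs.length ≤ 2 := by
        rcases cs with _ | ⟨a, _ | ⟨b, _ | ⟨c, r⟩⟩⟩ <;> first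
          | exact (h _ _ _ _ rfl).elim
          | simp
      rw [PySem.List.pyRange_of_pos _ _ (by norm_num), if_neg (by omega)]
      have h2 : pvChunks cs = [] := by
        rcases cs with _ | ⟨a, _ | ⟨b, _ | ⟨c, r⟩⟩⟩ <;> simp_all [pvChunks]
      simp [h2]

-- ===== VERDICT (by name: the statement is the Claim_ definition above) =====
theorem convertAsciiToPNGFormat_spec : Claim_equal_convertAsciiToPNGFormat := by
  intro s _
  unfold Spec_convertAsciiToPNGFormat convertAsciiToPNGFormat convertAsciiToPNGFormat_alt
  rw [pvA_eq_chunks s.toList, pvB_eq_chunks s.toList]
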